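-- pv_equiv track=rewrite | github.com/OpenGov/carpenter | carpenter/carpenter.py | stitch_block
-- ===== SOURCE A (Python) =====
-- def stitch_block(block_list):
--     '''
--     Stitches blocks together into a single block. These blocks are 2D tables
--     usually generated from tableproc. The final block will be of dimensions
--     (max(num_rows), sum(num_cols)).
--     '''
--     block_out = [[]]
--     for block in block_list:
--         num_row = len(block)
--         row_len = len(block[0])
--         if len(block_out) < num_row:
--             for i in range(num_row-len(block_out)):
--                 block_out.append([None]*len(block_out[0]))
--         for row_out, row_in in zip(block_out, block):
--             row_out.extend(row_in)
--         if len(block_out) > num_row: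
--             for row_out in block_out[num_row:]:
--                 row_out.extend([None]*row_len)
--     return block_out
-- ===== SOURCE B (Python) =====
-- def stitch_block(block_list):
--     '''
--     Stitches blocks together into a single block: row-major construction
--     instead of growing an accumulator block-by-block.
--     '''
--     widths = [len(b[0]) for b in block_list]
--     rows = 1
--     for b in block_list:
--         rows = max(rows, len(b))
--     out = []
--     for r in range(rows):
--         row = []
--         for b, w in zip(block_list, widths):
--             row.extend(b[r] if r < len(b) else [None] * w)
--         out.append(row)
--     return out
-- ===== Notes on version B (the rewrite author's own statement) =====
-- stated objective: alternative
-- what changed: B precomputes block widths and the row count, then builds the output row-major (one output row per pass over the blocks) instead of A's block-by-block growing/padding of a mutable accumulator.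
import Mathlib
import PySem

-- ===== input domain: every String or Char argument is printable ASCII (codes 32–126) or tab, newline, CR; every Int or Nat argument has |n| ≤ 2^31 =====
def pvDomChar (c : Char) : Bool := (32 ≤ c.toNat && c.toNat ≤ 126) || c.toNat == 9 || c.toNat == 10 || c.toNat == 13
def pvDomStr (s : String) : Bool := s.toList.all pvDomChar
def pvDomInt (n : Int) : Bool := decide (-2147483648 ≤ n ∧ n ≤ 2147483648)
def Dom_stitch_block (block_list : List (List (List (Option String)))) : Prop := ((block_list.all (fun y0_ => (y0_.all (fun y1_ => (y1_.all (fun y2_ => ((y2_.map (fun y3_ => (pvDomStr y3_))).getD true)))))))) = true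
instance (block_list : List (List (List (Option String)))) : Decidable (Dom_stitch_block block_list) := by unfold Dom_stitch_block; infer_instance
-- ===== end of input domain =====

-- B builds the result row-major from precomputed widths and a row count, instead of A's
-- block-by-block growing and padding of a mutable accumulator (objective: alternative).

-- ===== PORT A =====
-- one iteration of A's 'for block in block_list' loop over the accumulator block_out
def pvStepA (block_out : List (List (Option String))) (block : List (List (Option String))) : List (List (Option String)) :=
  let num_row := block.length
  let row_len := (block.headD []).length   -- len(block[0]); Python raises IndexError on an empty block (excluded by Pre_)
  -- if len(block_out) < num_row: append rows of [None]*len(block_out[0])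
  let bo1 := if block_out.length < num_row
    then block_out ++ (List.range (num_row - block_out.length)).map
           (fun _ => List.replicate (block_out.headD []).length (none : Option String))
    else block_out
  -- for row_out, row_in in zip(block_out, block): row_out.extend(row_in)
  let bo2 := bo1.zipIdx.map (fun ri => if ri.2 < num_row then ri.1 ++ block.getD ri.2 [] else ri.1)
  -- if len(block_out) > num_row: extend the tail rows with [None]*row_len
  if num_row < bo2.length
    then bo2.zipIdx.map (fun ri => if num_row ≤ ri.2 then ri.1 ++ List.replicate row_len (none : Option String) else ri.1)
    else bo2

def stitch_block (block_list : List (List (List (Option String)))) : List (List (Option String)) :=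
  block_list.foldl pvStepA [[]]

-- ===== PORT B =====
def stitch_block_alt (block_list : List (List (List (Option String)))) : List (List (Option String)) :=
  let widths := block_list.map (fun b => (b.headD []).length)   -- len(b[0]); raises on an empty block like A
  let rows := block_list.foldl (fun acc b => Nat.max acc b.length) 1
  (List.range rows).map (fun r =>
    (block_list.zip widths).foldl
      (fun row bw => row ++ (if r < bw.1.length then bw.1.getD r [] else List.replicate bw.2 (none : Option String)))
      [])

-- ===== PRECONDITION & SPEC =====
-- Pre_ excludes exactly the inputs on which Python A raises IndexError (some block is the empty list);
-- B raises there too (its width comprehension indexes b[0]).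
def Pre_stitch_block (block_list : List (List (List (Option String)))) : Prop :=
  ∀ b ∈ block_list, b ≠ []
instance (block_list : List (List (List (Option String)))) : Decidable (Pre_stitch_block block_list) := by unfold Pre_stitch_block; infer_instance

def pvWitness_stitch_block : List (List (List (Option String))) :=
  [[[some "a", none]], [[none], [some "b"]]]

def Spec_stitch_block (block_list : List (List (List (Option String)))) (out : List (List (Option String))) : Prop := out = stitch_block_alt block_list
instance (block_list : List (List (List (Option String)))) (out : List (List (Option String))) : Decidable (Spec_stitch_block block_list out) := by unfold Spec_stitch_block; infer_instance

-- ===== CLAIM (what is proved, stated in full; the proofs are below) =====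
def Claim_equal_stitch_block : Prop := ∀ (block_list : List (List (List (Option String)))), Dom_stitch_block block_list → Pre_stitch_block block_list → Spec_stitch_block block_list (stitch_block block_list)

-- ===== LEMMAS AND PROOFS =====

-- the cell contributed by block b to output row r
def pvCell (b : List (List (Option String))) (r : Nat) : List (Option String) :=
  if r < b.length then b.getD r [] else List.replicate (b.headD []).length (none : Option String)

def pvRowF (p : List (List (List (Option String)))) (r : Nat) : List (Option String) :=
  (p.map (fun b => pvCell b r)).flatten

def pvRows (p : List (List (List (Option String)))) : Nat :=
  p.foldl (fun acc b => Nat.max acc b.length) 1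

def pvW (p : List (List (List (Option String)))) : Nat :=
  (p.map (fun b => (b.headD []).length)).sum

def pvTbl (p : List (List (List (Option String)))) : List (List (Option String)) :=
  (List.range (pvRows p)).map (pvRowF p)

theorem pvFoldlMax_init {α : Type} (f : α → Nat) (l : List α) (a : Nat) :
    a ≤ l.foldl (fun acc b => Nat.max acc (f b)) a := by
  induction l generalizing a with
  | nil => simp
  | cons h t ih => exact le_trans (Nat.le_max_left a (f h)) (ih _)

theorem pvFoldlMax_mem {α : Type} (f : α → Nat) (l : List α) (a : Nat) {b : α} (hb : b ∈ l) :
    f b ≤ l.foldl (fun acc b => Nat.max acc (f b)) a := by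
  induction l generalizing a with
  | nil => cases hb
  | cons h t ih =>
    rcases List.mem_cons.mp hb with rfl | hb'
    · exact le_trans (Nat.le_max_right a (f b)) (pvFoldlMax_init f t _)
    · exact ih _ hb'

theorem pvFoldlMax_mono {α : Type} (f : α → Nat) (l : List α) {a a' : Nat} (h : a ≤ a') :
    l.foldl (fun acc b => Nat.max acc (f b)) a ≤ l.foldl (fun acc b => Nat.max acc (f b)) a' := by
  induction l generalizing a a' with
  | nil => simpa using h
  | cons c u ih => exact ih (max_le_max h le_rfl)

theorem pvRows_pos (p : List (List (List (Option String)))) : 1 ≤ pvRows p :=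
  pvFoldlMax_init _ p 1

theorem pvRows_mem (p : List (List (List (Option String)))) {b : List (List (Option String))}
    (hb : b ∈ p) : b.length ≤ pvRows p :=
  pvFoldlMax_mem _ p 1 hb

theorem pvRows_append (p : List (List (List (Option String)))) (b : List (List (Option String))) :
    pvRows (p ++ [b]) = Nat.max (pvRows p) b.length := by
  simp [pvRows, List.foldl_append]

theorem pvCell_zero_len (b : List (List (Option String))) :
    (pvCell b 0).length = (b.headD []).length := by
  cases b with
  | nil => simp [pvCell]
  | cons h t => simp [pvCell]

theorem pvRowF_zero_len (p : List (List (List (Option String)))) :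
    (pvRowF p 0).length = pvW p := by
  simp only [pvRowF, pvW, List.length_flatten, List.map_map]
  congr 1
  exact List.map_congr_left (fun b _ => pvCell_zero_len b)

theorem pvRowF_pad (p : List (List (List (Option String)))) (r : Nat) (hr : pvRows p ≤ r) :
    pvRowF p r = List.replicate (pvW p) (none : Option String) := by
  unfold pvRowF pvW
  induction p with
  | nil => simp
  | cons b t ih =>
    have hb : b.length ≤ r :=
      le_trans (pvRows_mem (b :: t) (List.mem_cons_self)) hr
    have ht : pvRows t ≤ r := by
      refine le_trans ?_ hr
      simp only [pvRows, List.foldl_cons]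
      exact pvFoldlMax_mono _ t (Nat.le_max_left 1 b.length)
    have hcell : pvCell b r = List.replicate (b.headD []).length none := by
      simp [pvCell, Nat.not_lt.mpr hb]
    simp only [List.map_cons, List.flatten_cons, hcell, ih ht, List.sum_cons,
      ← List.replicate_add]

theorem pvRowF_append (p : List (List (List (Option String)))) (b : List (List (Option String))) (r : Nat) :
    pvRowF (p ++ [b]) r = pvRowF p r ++ pvCell b r := by
  simp [pvRowF, List.map_append, List.flatten_append]

theorem pvZipIdx_map_range {α : Type} (m : Nat) (f : Nat → α) :
    ((List.range m).map f).zipIdx = (List.range m).map (fun i => (f i, i)) := by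
  apply List.ext_getElem
  · simp
  · intro i h1 h2
    simp

theorem pvZip_map_self {α β : Type} (l : List α) (f : α → β) :
    l.zip (l.map f) = l.map (fun x => (x, f x)) := by
  induction l with
  | nil => rfl
  | cons h t ih => simp [ih]

theorem pvAlt_eq_tbl (bl : List (List (List (Option String)))) :
    stitch_block_alt bl = pvTbl bl := by
  unfold stitch_block_alt pvTbl pvRows
  simp only [pvZip_map_self, List.foldl_map]
  congr 1
  funext r
  rw [PySem.List.foldl_append_eq_flatMap]
  simp [pvRowF, pvCell, List.flatMap_def]

theorem pvTbl_len (p : List (List (List (Option String)))) : (pvTbl p).length = pvRows p := by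
  simp [pvTbl]

theorem pvTbl_headD (p : List (List (List (Option String)))) :
    (pvTbl p).headD [] = pvRowF p 0 := by
  obtain ⟨k, hk⟩ : ∃ k, pvRows p = k + 1 := ⟨pvRows p - 1, by have := pvRows_pos p; omega⟩
  unfold pvTbl
  rw [hk, List.range_succ_eq_map]
  simp

theorem pvStep_tbl (p : List (List (List (Option String)))) (b : List (List (Option String))) :
    pvStepA (pvTbl p) b = pvTbl (p ++ [b]) := by
  have hR1 := pvRows_pos p
  have hbo1 : (if (pvTbl p).length < b.length
      then pvTbl p ++ (List.range (b.length - (pvTbl p).length)).map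
             (fun _ => List.replicate ((pvTbl p).headD []).length (none : Option String))
      else pvTbl p)
      = (List.range (Nat.max (pvRows p) b.length)).map (pvRowF p) := by
    rw [pvTbl_len, pvTbl_headD, pvRowF_zero_len]
    by_cases h : pvRows p < b.length
    · rw [if_pos h]
      have hmax : Nat.max (pvRows p) b.length = pvRows p + (b.length - pvRows p) := by rw [show (pvRows p).max b.length = max (pvRows p) b.length from rfl, Nat.max_def]; split <;> omega
      rw [hmax, List.range_add, List.map_append]
      unfold pvTbl
      congr 1
      rw [List.map_map]
      apply List.map_congr_left
      intro j hj
      simp only [Function.comp_apply]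
      rw [pvRowF_pad p _ (by omega)]
    · rw [if_neg h]
      have hmax : Nat.max (pvRows p) b.length = pvRows p := by rw [show (pvRows p).max b.length = max (pvRows p) b.length from rfl, Nat.max_def]; split <;> omega
      rw [hmax]
      rfl
  simp only [pvStepA]
  rw [hbo1, pvZipIdx_map_range, List.map_map]
  have hlen2 : (((List.range (Nat.max (pvRows p) b.length)).map
      ((fun ri => if ri.2 < b.length then ri.1 ++ b.getD ri.2 [] else ri.1) ∘
        fun i => (pvRowF p i, i)))).length = Nat.max (pvRows p) b.length := by
    simp
  have htbl : pvTbl (p ++ [b]) =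
      (List.range (Nat.max (pvRows p) b.length)).map (pvRowF (p ++ [b])) := by
    unfold pvTbl
    rw [pvRows_append]
  by_cases h2 : b.length < Nat.max (pvRows p) b.length
  · rw [if_pos (by rw [hlen2]; exact h2), pvZipIdx_map_range, List.map_map, htbl]
    apply List.map_congr_left
    intro r hr
    rw [List.mem_range] at hr
    simp only [Function.comp_apply]
    rw [pvRowF_append]
    by_cases hrn : r < b.length
    · simp [pvCell, hrn, Nat.not_le.mpr hrn]
    · simp [pvCell, hrn, Nat.le_of_not_lt hrn]
  · rw [if_neg (by rw [hlen2]; exact h2), htbl]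
    have hble : Nat.max (pvRows p) b.length = b.length := by
      rw [show (pvRows p).max b.length = max (pvRows p) b.length from rfl, Nat.max_def] at h2 ⊢
      split at h2 <;> split <;> omega
    apply List.map_congr_left
    intro r hr
    rw [List.mem_range, hble] at hr
    simp only [Function.comp_apply]
    rw [pvRowF_append]
    simp [pvCell, hr]

theorem pvA_eq_tbl (bl : List (List (List (Option String)))) :
    stitch_block bl = pvTbl bl := by
  induction bl using List.reverseRecOn with
  | nil => simp [stitch_block, pvTbl, pvRows, pvRowF]
  | append_singleton p b ih =>
    rw [stitch_block, List.foldl_append]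
    simp only [List.foldl_cons, List.foldl_nil]
    rw [show p.foldl pvStepA [[]] = stitch_block p from rfl, ih, pvStep_tbl]

-- ===== VERDICT (by name: the statement is the Claim_ definition above) =====
theorem stitch_block_spec : Claim_equal_stitch_block := by
  intro bl _ _
  unfold Spec_stitch_block
  rw [pvA_eq_tbl, pvAlt_eq_tbl]
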